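-- pv_equiv track=rewrite | github.com/MTKhajavi/DS-Course | Topological Sort/Q3/task.py | solve
-- ===== SOURCE A (Python) =====
-- def intersect(l1, r1, l2, r2):
--     if l1 <= l2 and r1 >= r2 or l2 <= l1 and r2 >= r1:
--         return False
--     if r2 <= r1 and l1 <= l2 and r2 <= l2:
--         return False
--     if l1 >= r2 and l1 >= l2 or r1 <= l2 and r1 <= r2:
--         return False
--     return True
--
-- def ans(color):
--     return ''.join(['I' if i == 0 else 'O' for i in color])
--
-- def dfs(v, clr, color, graph):
--     if color[v] != -1 and color[v] != clr:
--         return 'Impossible'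
--     if color[v] != -1:
--         return
--     color[v] = clr
--     for u in graph[v]:
--         if dfs(u, 1 - clr, color, graph) == 'Impossible':
--             return 'Impossible'
--
-- def solve(input):
--     n, m = input[0]
--     graph = [[] for i in range(m)]
--     vedge = []
--     color = [-1] * m
--     for i in range(m):
--         a, b = map(int, input[i + 1])
--         a, b = min(a, b), max(a, b)
--         for j, v in enumerate(vedge):
--             if intersect(a, b, v[0], v[1]):
--                 graph[i].append(j)
--                 graph[j].append(i)
--         vedge.append((a, b))
--
--     for i in range(m):
--         if color[i] == -1:
--             if dfs(i, 0, color, graph):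
--                 return 'Impossible'
--     return ans(color)
-- ===== SOURCE B (Python) =====
-- def intersect(l1, r1, l2, r2):
--     if l1 <= l2 and r1 >= r2 or l2 <= l1 and r2 >= r1:
--         return False
--     if r2 <= r1 and l1 <= l2 and r2 <= l2:
--         return False
--     if l1 >= r2 and l1 >= l2 or r1 <= l2 and r1 <= r2:
--         return False
--     return True
--
-- def solve(input):
--     n, m = input[0]
--     iv = []
--     for i in range(m):
--         a, b = map(int, input[i + 1])
--         iv.append((min(a, b), max(a, b)))
--     color = [-1] * m
--     for s in range(m):
--         if color[s] != -1:
--             continue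
--         stack = [(s, 0)]
--         while stack:
--             v, clr = stack.pop()
--             if color[v] != -1:
--                 if color[v] != clr:
--                     return 'Impossible'
--                 continue
--             color[v] = clr
--             nbr = [u for u in range(m)
--                    if u != v and intersect(iv[v][0], iv[v][1], iv[u][0], iv[u][1])]
--             for u in reversed(nbr):
--                 stack.append((u, 1 - clr))
--     return ''.join('I' if c == 0 else 'O' for c in color)
-- ===== Notes on version B (the rewrite author's own statement) =====
-- stated objective: alternative
-- what changed: B drops A's incrementally built adjacency lists and recursive two-coloring DFS: it normalises the intervals in one pass, then two-colors with an explicit-stack DFS that recomputes each vertex's crossing neighbours on demand, so no graph structure is ever materialised.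
import Mathlib
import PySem

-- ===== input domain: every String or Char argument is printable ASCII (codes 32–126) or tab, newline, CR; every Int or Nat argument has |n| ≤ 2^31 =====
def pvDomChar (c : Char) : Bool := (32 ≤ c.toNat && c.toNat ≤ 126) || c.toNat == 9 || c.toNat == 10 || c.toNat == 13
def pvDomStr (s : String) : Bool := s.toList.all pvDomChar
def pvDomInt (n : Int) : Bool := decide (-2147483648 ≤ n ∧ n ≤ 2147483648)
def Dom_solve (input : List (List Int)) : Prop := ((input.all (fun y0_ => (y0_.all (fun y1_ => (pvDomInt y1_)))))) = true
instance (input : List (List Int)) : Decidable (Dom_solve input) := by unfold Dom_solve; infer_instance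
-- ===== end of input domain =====

-- B replaces A's incrementally built adjacency lists + recursive two-coloring DFS by an
-- explicit-stack DFS that recomputes each vertex's crossing neighbours on demand (no graph
-- is materialised); same O(m^2) cost, return value only (A and B do not mutate their input).

-- ===== PORT A =====
-- intersect(l1, r1, l2, r2) (shared helper of both Pythons), literal branch order.
def pvInter (l1 r1 l2 r2 : Int) : Bool :=
  if (l1 ≤ l2 && r2 ≤ r1) || (l2 ≤ l1 && r1 ≤ r2) then false
  else if r2 ≤ r1 && l1 ≤ l2 && r2 ≤ l2 then false
  else if (r2 ≤ l1 && l2 ≤ l1) || (r1 ≤ l2 && r1 ≤ r2) then false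
  else true

-- dfs(v, clr, color, graph): the Bool is 'returned Impossible'; the mutated color list is
-- threaded as state.  Python's recursion has no fuel; depth is ≤ (#uncoloured)+1, so the
-- fuel m+1 supplied by solve below is never exhausted (proved via dfsA_stab in the lemmas).
def dfsA (graph : List (List Nat)) : Nat → Nat → Int → List Int → List Int × Bool
  | 0, _, _, color => (color, false)
  | fuel+1, v, clr, color =>
    let cv := color.getD v (-1)
    if cv != -1 && cv != clr then (color, true)
    else if cv != -1 then (color, false)
    else
      (graph.getD v []).foldl
        (fun st u => if st.2 then st else dfsA graph fuel u (1 - clr) st.1)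
        (color.set v clr, false)

-- solve: first loop builds (graph, vedge) — 'for j, v in enumerate(vedge)' is the zipIdx
-- fold (pairs (value, index)); row indexing/unpacking is total here via getD, exact on
-- Pre_solve (outside it Python raises).  Second loop runs dfs from each uncoloured vertex.
def solve (input : List (List Int)) : String :=
  let m := ((input.headD []).getD 1 0).toNat
  let built := (List.range m).foldl
    (fun (st : List (List Nat) × List (Int × Int)) i =>
      let row := input.getD (i+1) []
      let a := min (row.getD 0 0) (row.getD 1 0)
      let b := max (row.getD 0 0) (row.getD 1 0)
      ((st.2.zipIdx.foldl
        (fun (g : List (List Nat)) vj =>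
          if pvInter a b vj.1.1 vj.1.2 then
            (g.modify i (· ++ [vj.2])).modify vj.2 (· ++ [i])
          else g) st.1), st.2 ++ [(a, b)]))
    ((List.range m).map (fun _ => []), [])
  let fin := (List.range m).foldl
    (fun (st : List Int × Bool) i =>
      if st.2 then st
      else if st.1.getD i (-1) == -1 then dfsA built.1 (m+1) i 0 st.1
      else st)
    (List.replicate m (-1), false)
  if fin.2 then "Impossible"
  else PySem.Str.join "" (fin.1.map fun c => if c == 0 then "I" else "O")

-- ===== PORT B =====
-- the on-demand neighbour comprehension of Source B
def nbrsB (iv : List (Int × Int)) (m : Nat) (v : Nat) : List Nat :=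
  (List.range m).filter (fun u =>
    u != v && pvInter (iv.getD v (0,0)).1 (iv.getD v (0,0)).2
                      (iv.getD u (0,0)).1 (iv.getD u (0,0)).2)

-- the while-loop over the explicit stack; the Lean list holds the stack TOP-FIRST, so
-- Python's pop-from-the-end is the head match and 'for u in reversed(nbr): append' is a
-- prepend of nbr in order.  Total pops are < (m+1)^2, so the fuel m*m+m+2 supplied by
-- solve_alt never runs out (proved via stackRun_stab in the lemmas).
def stackRun (iv : List (Int × Int)) (m : Nat) : Nat → List (Nat × Int) → List Int → List Int × Bool
  | 0, _, color => (color, false)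
  | _+1, [], color => (color, false)
  | fuel+1, (v, clr) :: rest, color =>
    let cv := color.getD v (-1)
    if cv != -1 then
      if cv != clr then (color, true) else stackRun iv m fuel rest color
    else
      stackRun iv m fuel ((nbrsB iv m v).map (fun u => (u, 1 - clr)) ++ rest)
        (color.set v clr)

def solve_alt (input : List (List Int)) : String :=
  let m := ((input.headD []).getD 1 0).toNat
  let iv := (List.range m).map (fun i =>
    let row := input.getD (i+1) []
    (min (row.getD 0 0) (row.getD 1 0), max (row.getD 0 0) (row.getD 1 0)))
  let fin := (List.range m).foldl
    (fun (st : List Int × Bool) s =>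
      if st.2 then st
      else if st.1.getD s (-1) != -1 then st
      else stackRun iv m (m * m + m + 2) [(s, 0)] st.1)
    (List.replicate m (-1), false)
  if fin.2 then "Impossible"
  else PySem.Str.join "" (fin.1.map fun c => if c == 0 then "I" else "O")

-- ===== PRECONDITION & SPEC =====
-- Pre_solve excludes exactly the inputs where Python A raises: an empty list or a first row
-- not of length 2 (unpacking 'n, m = input[0]' fails), fewer than m further rows
-- (IndexError), or one of rows 1..m not of length 2 (unpacking fails).
def Pre_solve (input : List (List Int)) : Prop :=
  input ≠ [] ∧ (input.headD []).length = 2 ∧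
  ((input.headD []).getD 1 0) + 1 ≤ (input.length : Int) ∧
  ∀ r ∈ input.tail.take ((input.headD []).getD 1 0).toNat, r.length = 2
instance (input : List (List Int)) : Decidable (Pre_solve input) := by unfold Pre_solve; infer_instance

def pvWitness_solve : List (List Int) := [[2, 2], [0, 2], [1, 3]]

def Spec_solve (input : List (List Int)) (out : String) : Prop := out = solve_alt input
instance (input : List (List Int)) (out : String) : Decidable (Spec_solve input out) := by unfold Spec_solve; infer_instance

-- ===== CLAIM (what is proved, stated in full; the proofs are below) =====
def Claim_equal_solve : Prop := ∀ (input : List (List Int)), Dom_solve input → Pre_solve input → Spec_solve input (solve input)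

-- ===== LEMMAS AND PROOFS =====

-- the normalised interval of row i+1 (what both Pythons compute for vertex i)
def ivf (input : List (List Int)) (i : Nat) : Int × Int :=
  let row := input.getD (i+1) []
  (min (row.getD 0 0) (row.getD 1 0), max (row.getD 0 0) (row.getD 1 0))

-- crossing test between vertices, through an abstract interval table f
def cr (f : Nat → Int × Int) (i u : Nat) : Bool :=
  pvInter (f i).1 (f i).2 (f u).1 (f u).2

-- B's canonical neighbour list
def nbF (f : Nat → Int × Int) (m v : Nat) : List Nat :=
  (List.range m).filter (fun u => u != v && cr f v u)

-- A's adjacency list of v after k outer iterations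
def gk (f : Nat → Int × Int) (k v : Nat) : List Nat :=
  (List.range v).filter (fun u => cr f v u) ++
  (List.range k).filter (fun u => decide (v < u) && cr f u v)

def uncol (c : List Int) : Nat := c.countP (fun x => x == -1)

-- 'c' evolves to 'c'' by colouring: same length, set entries never change
def ColExt (c c' : List Int) : Prop :=
  c'.length = c.length ∧ ∀ u : Nat, c.getD u (-1) ≠ -1 → c'.getD u (-1) = c.getD u (-1)

lemma pvInter_comm (a b c d : Int) (h1 : a ≤ b) (h2 : c ≤ d) :
    pvInter a b c d = pvInter c d a b := by
  unfold pvInter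
  split_ifs with h1 h2 h3 h4 h5 h6 <;>
    simp only [Bool.or_eq_true, Bool.and_eq_true, decide_eq_true_eq] at * <;> omega

lemma ivf_le (input : List (List Int)) (i : Nat) : (ivf input i).1 ≤ (ivf input i).2 := by
  simp [ivf]

lemma cr_comm (f : Nat → Int × Int) (hf : ∀ i, (f i).1 ≤ (f i).2) (i u : Nat) :
    cr f i u = cr f u i := by
  unfold cr
  exact pvInter_comm _ _ _ _ (hf i) (hf u)

lemma mem_nbF {f : Nat → Int × Int} {m v u : Nat} (h : u ∈ nbF f m v) : u < m := by
  simp only [nbF, List.mem_filter, List.mem_range] at h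
  exact h.1

lemma length_nbF (f : Nat → Int × Int) (m v : Nat) : (nbF f m v).length ≤ m := by
  calc (nbF f m v).length ≤ (List.range m).length := List.length_filter_le _ _
    _ = m := List.length_range

lemma getD_set_ne {c : List Int} {v u : Nat} (h : u ≠ v) (x d : Int) :
    (c.set v x).getD u d = c.getD u d := by
  simp [List.getD_eq_getElem?_getD, List.getElem?_set_ne (Ne.symm h)]

lemma uncol_set {c : List Int} {v : Nat} {x : Int}
    (hv : v < c.length) (hc : c.getD v (-1) = -1) (hx : x ≠ -1) :
    uncol (c.set v x) + 1 = uncol c := by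
  induction c generalizing v with
  | nil => simp at hv
  | cons h t ih =>
    cases v with
    | zero =>
      simp only [List.getD_eq_getElem?_getD, List.getElem?_cons_zero, Option.getD_some] at hc
      subst hc
      simp [uncol, List.countP_cons, hx]
    | succ v =>
      have hv' : v < t.length := by simpa using hv
      have hc' : t.getD v (-1) = -1 := by
        simpa [List.getD_eq_getElem?_getD] using hc
      have := ih hv' hc'
      by_cases hh : h = -1 <;>
        simp only [List.set_cons_succ, uncol, List.countP_cons, hh] at * <;> omega

lemma uncol_le_length (c : List Int) : uncol c ≤ c.length := List.countP_le_length

lemma ColExt.refl (c : List Int) : ColExt c c := ⟨rfl, fun _ _ => rfl⟩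

lemma ColExt.trans {a b c : List Int} (h1 : ColExt a b) (h2 : ColExt b c) : ColExt a c := by
  obtain ⟨l1, p1⟩ := h1
  obtain ⟨l2, p2⟩ := h2
  refine ⟨l2.trans l1, fun u hu => ?_⟩
  rw [p2 u (by rw [p1 u hu]; exact hu), p1 u hu]

lemma ColExt.set {c : List Int} {v : Nat} {x : Int} (hc : c.getD v (-1) = -1) :
    ColExt c (c.set v x) := by
  refine ⟨List.length_set, fun u hu => ?_⟩
  by_cases huv : u = v
  · subst huv; exact absurd hc hu
  · exact getD_set_ne huv _ _

lemma ColExt.uncol_le {c c' : List Int} (h : ColExt c c') : uncol c' ≤ uncol c := by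
  obtain ⟨hlen, hpt⟩ := h
  induction c generalizing c' with
  | nil => cases c' <;> simp_all [uncol]
  | cons a t ih =>
    cases c' with
    | nil => simp at hlen
    | cons b t' =>
      have hptS : ∀ u : Nat, t.getD u (-1) ≠ -1 → t'.getD u (-1) = t.getD u (-1) := by
        intro u hu
        have := hpt (u+1)
        simpa [List.getD_eq_getElem?_getD] using
          this (by simpa [List.getD_eq_getElem?_getD] using hu)
      have htail := ih (c' := t') (by simpa using hlen) hptS
      by_cases ha : a = -1
      · have h1 : uncol (b :: t') ≤ uncol t' + 1 := by
          simp only [uncol, List.countP_cons]; split <;> omega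
        have h2 : uncol (a :: t) = uncol t + 1 := by
          simp [uncol, List.countP_cons, ha]
        omega
      · have hb : b = a := by
          have := hpt 0
          simpa [List.getD_eq_getElem?_getD] using
            this (by simpa [List.getD_eq_getElem?_getD] using ha)
        have h1 : uncol (b :: t') = uncol t' := by
          simp [uncol, List.countP_cons, hb, ha]
        have h2 : uncol (a :: t) = uncol t := by
          simp [uncol, List.countP_cons, ha]
        omega

lemma dfsA_ext (G : List (List Nat)) :
    ∀ fuel v clr c, ColExt c (dfsA G fuel v clr c).1 := by
  intro fuel
  induction fuel with
  | zero => intro v clr c; exact ColExt.refl c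
  | succ fuel ih =>
    intro v clr c
    have aux : ∀ (l : List Nat) (st : List Int × Bool),
        ColExt st.1 ((l.foldl (fun st u => if st.2 then st else dfsA G fuel u (1 - clr) st.1) st)).1 := by
      intro l
      induction l with
      | nil => intro st; exact ColExt.refl _
      | cons u l ihl =>
        intro st
        by_cases h2 : st.2
        · simpa [List.foldl_cons, h2] using ihl st
        · simp only [List.foldl_cons, h2, if_neg, Bool.false_eq_true, not_false_eq_true,
            if_false]
          exact ColExt.trans (ih u (1 - clr) st.1) (ihl _)
    by_cases hcv1 : c.getD v (-1) = -1
    · simp only [dfsA, hcv1, bne_self_eq_false, Bool.false_and, Bool.false_eq_true,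
        not_false_eq_true, if_neg, if_pos]
      exact ColExt.trans (ColExt.set hcv1) (aux _ _)
    · have hbne : (c.getD v (-1) != -1) = true := by simpa using hcv1
      by_cases hcl : c.getD v (-1) = clr
      · rw [hcl] at hbne
        simp only [dfsA, hcl, bne_self_eq_false, Bool.and_false, hbne, Bool.false_eq_true,
          not_false_eq_true, if_neg, if_pos]
        exact ColExt.refl c
      · have hbne2 : (c.getD v (-1) != clr) = true := by simpa using hcl
        simp only [dfsA, hbne, hbne2, Bool.true_and, if_pos]
        exact ColExt.refl c

lemma foldDfs_skip (G : List (List Nat)) (fuel : Nat) (clr : Int) (l : List Nat) (c : List Int) :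
    l.foldl (fun st u => if st.2 then st else dfsA G fuel u (1 - clr) st.1) (c, true) = (c, true) := by
  induction l with
  | nil => rfl
  | cons u l ih => simpa [List.foldl_cons] using ih

-- any two sufficient fuels give the same dfs run
lemma dfsA_stab (G : List (List Nat)) (m : Nat) (hGl : G.length = m) :
    ∀ N c, uncol c ≤ N → ∀ v clr f1 f2, (clr = 0 ∨ clr = 1) → c.length = m →
      uncol c < f1 → uncol c < f2 →
      dfsA G f1 v clr c = dfsA G f2 v clr c := by
  intro N
  induction N using Nat.strong_induction_on with
  | _ N IH =>
  intro c hcN v clr f1 f2 hclr hlen h1 h2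
  cases f1 with
  | zero => omega
  | succ a =>
  cases f2 with
  | zero => omega
  | succ b =>
  by_cases hcv1 : c.getD v (-1) = -1
  · simp only [dfsA, hcv1, bne_self_eq_false, Bool.false_and, Bool.false_eq_true,
      not_false_eq_true, if_neg, if_pos]
    by_cases hv : v < m
    · have hvc : v < c.length := by omega
      have hclr' : clr ≠ -1 := by rcases hclr with h | h <;> simp [h]
      have hun : uncol (c.set v clr) + 1 = uncol c := uncol_set hvc hcv1 hclr'
      have key : ∀ (l : List Nat) (st : List Int × Bool), st.1.length = m →
          uncol st.1 + 1 ≤ uncol c →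
          l.foldl (fun st u => if st.2 then st else dfsA G a u (1 - clr) st.1) st
            = l.foldl (fun st u => if st.2 then st else dfsA G b u (1 - clr) st.1) st := by
        intro l
        induction l with
        | nil => intro st _ _; rfl
        | cons u l ihl =>
          intro st hstl hstu
          by_cases h2 : st.2
          · simp only [List.foldl_cons, h2, if_pos]
            exact ihl st hstl hstu
          · simp only [List.foldl_cons, h2, Bool.false_eq_true, not_false_eq_true, if_neg]
            have hstep : dfsA G a u (1 - clr) st.1 = dfsA G b u (1 - clr) st.1 := by
              apply IH (uncol st.1) (by omega) st.1 le_rfl u (1 - clr) a b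
                (by rcases hclr with h | h <;> simp [h]) hstl (by omega) (by omega)
            rw [hstep]
            have hext := dfsA_ext G b u (1 - clr) st.1
            refine ihl _ (by rw [hext.1, hstl]) ?_
            have := hext.uncol_le
            omega
      exact key _ (c.set v clr, false) (by simp [hlen])
        (le_of_eq (by simpa using hun))
    · have hnil : G.getD v [] = [] := by
        rw [List.getD_eq_getElem?_getD, List.getElem?_eq_none (by omega)]
        rfl
      rw [hnil]
      rfl
  · have hbne : (c.getD v (-1) != -1) = true := by simpa using hcv1
    by_cases hcl : c.getD v (-1) = clr
    · rw [hcl] at hbne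
      simp only [dfsA, hcl, bne_self_eq_false, Bool.and_false, hbne, Bool.false_eq_true,
        not_false_eq_true, if_neg, if_pos]
    · have hbne2 : (c.getD v (-1) != clr) = true := by simpa using hcl
      simp only [dfsA, hbne, hbne2, Bool.true_and, if_pos]

-- any two sufficient fuels give the same stack run
lemma mem_nbrsB {iv : List (Int × Int)} {m v u : Nat} (h : u ∈ nbrsB iv m v) : u < m := by
  simp only [nbrsB, List.mem_filter, List.mem_range] at h
  exact h.1

lemma length_nbrsB (iv : List (Int × Int)) (m v : Nat) : (nbrsB iv m v).length ≤ m :=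
  le_trans (List.length_filter_le _ _) (le_of_eq List.length_range)

lemma stackRun_stab (iv : List (Int × Int)) (m : Nat) :
    ∀ N c s, uncol c * (m+1) + s.length ≤ N → c.length = m →
      (∀ p ∈ s, p.1 < m ∧ (p.2 = 0 ∨ p.2 = 1)) →
      ∀ f1 f2, uncol c * (m+1) + s.length < f1 → uncol c * (m+1) + s.length < f2 →
      stackRun iv m f1 s c = stackRun iv m f2 s c := by
  intro N
  induction N using Nat.strong_induction_on with
  | _ N IH =>
  intro c s hN hlen hs f1 f2 h1 h2
  cases f1 with
  | zero => omega
  | succ a =>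
  cases f2 with
  | zero => omega
  | succ b =>
  cases s with
  | nil => rfl
  | cons p rest =>
  obtain ⟨v, clr⟩ := p
  have hvm : v < m := by simpa using (hs (v, clr) List.mem_cons_self).1
  have hclr : clr = 0 ∨ clr = 1 := by simpa using (hs (v, clr) List.mem_cons_self).2
  have hrest : ∀ p ∈ rest, p.1 < m ∧ (p.2 = 0 ∨ p.2 = 1) :=
    fun p hp => hs p (List.mem_cons_of_mem _ hp)
  by_cases hcv1 : c.getD v (-1) = -1
  · simp only [stackRun, hcv1, bne_self_eq_false, Bool.false_eq_true,
      not_false_eq_true, if_neg]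
    have hvc : v < c.length := by omega
    have hclr' : clr ≠ -1 := by rcases hclr with h | h <;> simp [h]
    have hun : uncol (c.set v clr) + 1 = uncol c := uncol_set hvc hcv1 hclr'
    have hk := length_nbrsB iv m v
    have hmu : uncol (c.set v clr) * (m+1) + (m+1) = uncol c * (m+1) := by
      rw [← hun]; ring
    have hinv : ∀ p ∈ (nbrsB iv m v).map (fun u => (u, 1 - clr)) ++ rest,
        p.1 < m ∧ (p.2 = 0 ∨ p.2 = 1) := by
      intro p hp
      rcases List.mem_append.mp hp with hp1 | hp2
      · obtain ⟨u, hu, rfl⟩ := List.mem_map.mp hp1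
        refine ⟨by simpa using mem_nbrsB hu, ?_⟩
        rcases hclr with h | h <;> subst h <;> norm_num
      · exact hrest p hp2
    apply IH (uncol (c.set v clr) * (m+1)
        + ((nbrsB iv m v).map (fun u => (u, 1 - clr)) ++ rest).length)
      ?_ _ _ le_rfl (by simp [hlen]) hinv a b ?_ ?_
    · simp only [List.length_append, List.length_map, List.length_cons] at hN ⊢
      linarith [hmu, hk]
    · simp only [List.length_append, List.length_map, List.length_cons] at h1 ⊢
      linarith [hmu, hk]
    · simp only [List.length_append, List.length_map, List.length_cons] at h2 ⊢
      linarith [hmu, hk]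
  · have hbne : (c.getD v (-1) != -1) = true := by simpa using hcv1
    by_cases hclq : c.getD v (-1) = clr
    · rw [hclq] at hbne
      simp only [stackRun, hclq, bne_self_eq_false, hbne, Bool.false_eq_true,
        not_false_eq_true, if_neg, if_pos]
      exact IH (uncol c * (m+1) + rest.length) (by simp at hN ⊢; omega) _ _ le_rfl hlen
        hrest a b (by simp at h1 ⊢; omega) (by simp at h2 ⊢; omega)
    · have hbne2 : (c.getD v (-1) != clr) = true := by simpa using hclq
      simp only [stackRun, hbne, hbne2, if_pos]

-- the simulation: pushing (v, clr) and running the stack is exactly running A's dfs and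
-- then continuing with the rest of the stack (and a conflict anywhere is a conflict here)
lemma sim (G : List (List Nat)) (iv : List (Int × Int)) (m : Nat) (f : Nat → Int × Int)
    (hGl : G.length = m)
    (hG : ∀ v, v < m → G.getD v [] = nbF f m v)
    (hB : ∀ v, v < m → nbrsB iv m v = nbF f m v) :
    ∀ N c v clr s, uncol c ≤ N → c.length = m → (clr = 0 ∨ clr = 1) → v < m →
      (∀ p ∈ s, p.1 < m ∧ (p.2 = 0 ∨ p.2 = 1)) →
      (((dfsA G (uncol c + 1) v clr c).2 = true →
          ∀ f1, uncol c * (m+1) + s.length + 1 < f1 →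
            (stackRun iv m f1 ((v,clr)::s) c).2 = true)
        ∧ ((dfsA G (uncol c + 1) v clr c).2 = false →
          ∀ f1 f2, uncol c * (m+1) + s.length + 1 < f1 →
            uncol (dfsA G (uncol c + 1) v clr c).1 * (m+1) + s.length < f2 →
            stackRun iv m f1 ((v,clr)::s) c
              = stackRun iv m f2 s (dfsA G (uncol c + 1) v clr c).1)) := by
  intro N
  induction N using Nat.strong_induction_on with
  | _ N IH =>
  intro c v clr s hcN hlen hclr hvm hs
  by_cases hcv1 : c.getD v (-1) = -1
  case neg =>
    have hbne : (c.getD v (-1) != -1) = true := by simpa using hcv1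
    by_cases hclq : c.getD v (-1) = clr
    · rw [hclq] at hbne
      have hdfs : dfsA G (uncol c + 1) v clr c = (c, false) := by
        simp only [dfsA, hclq, bne_self_eq_false, Bool.and_false, hbne, Bool.false_eq_true,
          not_false_eq_true, if_neg, if_pos]
      rw [hdfs]
      constructor
      · intro h; simp at h
      · intro _ f1 f2 hf1 hf2
        cases f1 with
        | zero => omega
        | succ a =>
        simp only [stackRun, hclq, bne_self_eq_false, hbne, Bool.false_eq_true,
          not_false_eq_true, if_neg, if_pos]
        dsimp only at hf2 ⊢
        exact stackRun_stab iv m (uncol c * (m+1) + s.length) c s le_rfl hlen hs a f2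
          (by omega) (by omega)
    · have hbne2 : (c.getD v (-1) != clr) = true := by simpa using hclq
      have hdfs : dfsA G (uncol c + 1) v clr c = (c, true) := by
        simp only [dfsA, hbne, hbne2, Bool.true_and, if_pos]
      rw [hdfs]
      constructor
      · intro _ f1 hf1
        cases f1 with
        | zero => omega
        | succ a =>
        simp only [stackRun, hbne, hbne2, if_pos]
      · intro h; simp at h
  case pos =>
    have hvc : v < c.length := by omega
    have hclr' : clr ≠ -1 := by rcases hclr with h | h <;> simp [h]
    have hclr1 : 1 - clr = 0 ∨ 1 - clr = 1 := by rcases hclr with h | h <;> simp [h]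
    have hun : uncol (c.set v clr) + 1 = uncol c := uncol_set hvc hcv1 hclr'
    have hdfs : dfsA G (uncol c + 1) v clr c
        = (nbF f m v).foldl
            (fun st u => if st.2 then st else dfsA G (uncol c) u (1 - clr) st.1)
            (c.set v clr, false) := by
      simp only [dfsA, hcv1, bne_self_eq_false, Bool.false_and, Bool.false_eq_true,
        not_false_eq_true, if_neg, if_pos]
      rw [hG v hvm]
    have fold : ∀ (l : List Nat) (c' : List Int), (∀ u ∈ l, u < m) → c'.length = m →
        uncol c' < uncol c →
        (((l.foldl (fun st u => if st.2 then st else dfsA G (uncol c) u (1 - clr) st.1)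
              (c', false)).2 = true →
           ∀ fa, uncol c' * (m+1) + l.length + s.length < fa →
             (stackRun iv m fa (l.map (fun u => (u, 1 - clr)) ++ s) c').2 = true)
         ∧ ((l.foldl (fun st u => if st.2 then st else dfsA G (uncol c) u (1 - clr) st.1)
              (c', false)).2 = false →
           ∀ fa fb, uncol c' * (m+1) + l.length + s.length < fa →
             uncol (l.foldl (fun st u => if st.2 then st else dfsA G (uncol c) u (1 - clr) st.1)
                (c', false)).1 * (m+1) + s.length < fb →
             stackRun iv m fa (l.map (fun u => (u, 1 - clr)) ++ s) c'
               = stackRun iv m fb s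
                   (l.foldl (fun st u => if st.2 then st else dfsA G (uncol c) u (1 - clr) st.1)
                     (c', false)).1)) := by
      intro l
      induction l with
      | nil =>
        intro c' hul hclen hcu
        constructor
        · intro h; simp at h
        · intro _ fa fb hfa hfb
          simp only [List.foldl_nil, List.map_nil, List.nil_append,
            List.length_nil] at hfa hfb ⊢
          exact stackRun_stab iv m (uncol c' * (m+1) + s.length) c' s le_rfl hclen hs fa fb
            (by omega) (by omega)
      | cons u l ihl =>
        intro c' hul hclen hcu
        have hum : u < m := hul u List.mem_cons_self
        have hulr : ∀ x ∈ l, x < m := fun x hx => hul x (List.mem_cons_of_mem _ hx)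
        have hstab : dfsA G (uncol c) u (1 - clr) c' = dfsA G (uncol c' + 1) u (1 - clr) c' :=
          dfsA_stab G m hGl (uncol c') c' le_rfl u (1 - clr) (uncol c) (uncol c' + 1)
            hclr1 hclen (by omega) (by omega)
        have hinv' : ∀ p ∈ l.map (fun u => (u, 1 - clr)) ++ s, p.1 < m ∧ (p.2 = 0 ∨ p.2 = 1) := by
          intro p hp
          rcases List.mem_append.mp hp with hp1 | hp2
          · obtain ⟨x, hx, rfl⟩ := List.mem_map.mp hp1
            exact ⟨by simpa using hulr x hx, by simpa using hclr1⟩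
          · exact hs p hp2
        have hsim := IH (uncol c') (by omega) c' u (1 - clr) (l.map (fun u => (u, 1 - clr)) ++ s)
          le_rfl hclen hclr1 hum hinv'
        have hextU := dfsA_ext G (uncol c' + 1) u (1 - clr) c'
        have hfold1 : (u :: l).foldl
            (fun st u => if st.2 then st else dfsA G (uncol c) u (1 - clr) st.1) (c', false)
            = l.foldl (fun st u => if st.2 then st else dfsA G (uncol c) u (1 - clr) st.1)
                (dfsA G (uncol c' + 1) u (1 - clr) c') := by
          simp only [List.foldl_cons, Bool.false_eq_true, not_false_eq_true, if_neg, if_pos]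
          rw [hstab]
        by_cases hru2 : (dfsA G (uncol c' + 1) u (1 - clr) c').2 = true
        · have hpair : dfsA G (uncol c' + 1) u (1 - clr) c'
              = ((dfsA G (uncol c' + 1) u (1 - clr) c').1, true) := by
            rw [← hru2]
          have hres : (u :: l).foldl
              (fun st u => if st.2 then st else dfsA G (uncol c) u (1 - clr) st.1) (c', false)
              = ((dfsA G (uncol c' + 1) u (1 - clr) c').1, true) := by
            rw [hfold1, hpair, foldDfs_skip]
          constructor
          · intro _ fa hfa
            have : ((u :: l).map (fun u => (u, 1 - clr)) ++ s)
                = (u, 1 - clr) :: (l.map (fun u => (u, 1 - clr)) ++ s) := by simp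
            rw [this]
            apply hsim.1 hru2 fa
            simp only [List.length_append, List.length_map, List.length_cons] at hfa ⊢
            linarith
          · intro h
            rw [hres] at h
            simp at h
        · have hru2' : (dfsA G (uncol c' + 1) u (1 - clr) c').2 = false := by
            simpa using hru2
          have hpair : dfsA G (uncol c' + 1) u (1 - clr) c'
              = ((dfsA G (uncol c' + 1) u (1 - clr) c').1, false) := by
            rw [← hru2']
          have hres : (u :: l).foldl
              (fun st u => if st.2 then st else dfsA G (uncol c) u (1 - clr) st.1) (c', false)
              = l.foldl (fun st u => if st.2 then st else dfsA G (uncol c) u (1 - clr) st.1)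
                  (((dfsA G (uncol c' + 1) u (1 - clr) c').1), false) := by
            rw [hfold1, hpair]
          have hclen2 : (dfsA G (uncol c' + 1) u (1 - clr) c').1.length = m := by
            rw [hextU.1, hclen]
          have huncol2 : uncol (dfsA G (uncol c' + 1) u (1 - clr) c').1 ≤ uncol c' :=
            hextU.uncol_le
          have ihl2 := ihl (dfsA G (uncol c' + 1) u (1 - clr) c').1 hulr hclen2 (by omega)
          have hstep := hsim.2 hru2'
          constructor
          · intro hres2 fa hfa
            rw [hres] at hres2
            have hsplit : ((u :: l).map (fun u => (u, 1 - clr)) ++ s)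
                = (u, 1 - clr) :: (l.map (fun u => (u, 1 - clr)) ++ s) := by simp
            rw [hsplit]
            rw [hstep fa
              (uncol (dfsA G (uncol c' + 1) u (1 - clr) c').1 * (m+1)
                + (l.map (fun u => (u, 1 - clr)) ++ s).length + 1)
              (by simp only [List.length_append, List.length_map, List.length_cons] at hfa ⊢
                  linarith)
              (by simp only [List.length_append, List.length_map]; linarith)]
            apply ihl2.1 hres2
            simp only [List.length_append, List.length_map]
            linarith
          · intro hres2 fa fb hfa hfb
            rw [hres] at hres2 ⊢
            rw [hres] at hfb
            have hsplit : ((u :: l).map (fun u => (u, 1 - clr)) ++ s)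
                = (u, 1 - clr) :: (l.map (fun u => (u, 1 - clr)) ++ s) := by simp
            rw [hsplit]
            rw [hstep fa
              (uncol (dfsA G (uncol c' + 1) u (1 - clr) c').1 * (m+1)
                + (l.map (fun u => (u, 1 - clr)) ++ s).length + 1)
              (by simp only [List.length_append, List.length_map, List.length_cons] at hfa ⊢
                  linarith)
              (by simp only [List.length_append, List.length_map]; linarith)]
            apply ihl2.2 hres2
            · simp only [List.length_append, List.length_map]
              linarith
            · exact hfb
    have hk : (nbF f m v).length ≤ m := length_nbF f m v
    have hmu : uncol (c.set v clr) * (m+1) + (m+1) = uncol c * (m+1) := by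
      rw [← hun]; ring
    have hfold := fold (nbF f m v) (c.set v clr) (fun u hu => mem_nbF hu)
      (by simp [hlen]) (by omega)
    rw [hdfs]
    constructor
    · intro hres f1 hf1
      cases f1 with
      | zero => omega
      | succ a =>
      simp only [stackRun, hcv1, bne_self_eq_false, Bool.false_eq_true,
        not_false_eq_true, if_neg]
      rw [hB v hvm]
      apply hfold.1 hres a
      linarith
    · intro hres f1 f2 hf1 hf2
      cases f1 with
      | zero => omega
      | succ a =>
      simp only [stackRun, hcv1, bne_self_eq_false, Bool.false_eq_true,
        not_false_eq_true, if_neg]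
      rw [hB v hvm]
      apply hfold.2 hres a f2
      · linarith
      · exact hf2

-- ===== phase 1: A's first loop builds exactly the neighbour lists B recomputes =====

lemma modify_map_range {α : Type} (h : Nat → α) (m t : Nat) (g : α → α) :
    ((List.range m).map h).modify t g
      = (List.range m).map (fun v => if v = t then g (h v) else h v) := by
  apply List.ext_getElem
  · simp
  · intro i h1 h2
    rw [List.getElem_modify]
    simp only [List.length_modify, List.length_map, List.length_range] at h1 h2
    by_cases hit : t = i
    · subst hit
      simp [List.getElem_map, List.getElem_range]
    · simp [List.getElem_map, List.getElem_range, hit, Ne.symm hit]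

lemma zipIdx_map_range {α : Type} (f : Nat → α) (k : Nat) :
    ((List.range k).map f).zipIdx = (List.range k).map (fun j => (f j, j)) := by
  apply List.ext_getElem
  · simp
  · intro i h1 h2
    simp [List.getElem_zipIdx]

lemma inner_aux (f : Nat → Int × Int) (m k : Nat) (hk : k < m) :
    ∀ j0, j0 ≤ k →
      (List.range j0).foldl
        (fun g j => if cr f k j then (g.modify k (· ++ [j])).modify j (· ++ [k]) else g)
        ((List.range m).map (fun v => if v < k then gk f k v else []))
      = (List.range m).map (fun v =>
          if v = k then (List.range j0).filter (fun u => cr f k u)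
          else if v < k then gk f k v ++ (if v < j0 ∧ cr f k v = true then [k] else [])
          else []) := by
  intro j0
  induction j0 with
  | zero =>
    intro _
    simp only [List.range_zero, List.foldl_nil, List.filter_nil]
    apply List.map_congr_left
    intro v hv
    by_cases hvk : v = k
    · subst hvk; simp
    · by_cases hvlt : v < k
      · simp [hvk, hvlt]
      · simp [hvk, hvlt]
  | succ j0 ih =>
    intro hj
    have hj0 : j0 < k := by omega
    rw [List.range_succ, List.foldl_append, ih (by omega)]
    simp only [List.foldl_cons, List.foldl_nil]
    by_cases hcr : cr f k j0 = true
    · rw [if_pos hcr, modify_map_range, modify_map_range]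
      apply List.map_congr_left
      intro v hv
      rw [List.mem_range] at hv
      by_cases hvk : v = k
      · subst hvk
        have hne : ¬ (v = j0) := by omega
        simp only [hne, if_neg, if_pos rfl, if_false, ite_true, ite_false]
        simp [List.range_succ, List.filter_append, hcr, hne, Nat.lt_irrefl]
      · by_cases hvj : v = j0
        · subst hvj
          simp [hvk, hj0, hcr, Nat.lt_irrefl]
        · by_cases hvlt : v < k
          · have h1 : (v < j0 + 1) = (v < j0) := by
              apply propext; constructor <;> intro h <;> omega
            simp [hvk, hvj, hvlt, h1]
          · simp [hvk, hvj, hvlt]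
    · rw [if_neg hcr]
      apply List.map_congr_left
      intro v hv
      rw [List.mem_range] at hv
      by_cases hvk : v = k
      · subst hvk
        simp [List.range_succ, List.filter_append, hcr]
      · by_cases hvj : v = j0
        · subst hvj
          simp [hvk, hj0, hcr, Nat.lt_irrefl]
        · by_cases hvlt : v < k
          · have h1 : (v < j0 + 1) = (v < j0) := by
              apply propext; constructor <;> intro h <;> omega
            simp [hvk, hvj, hvlt, h1]
          · simp [hvk, hvj, hvlt]

lemma phase1 (f : Nat → Int × Int) (m : Nat) :
    ∀ k, k ≤ m →
      (List.range k).foldl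
        (fun (st : List (List Nat) × List (Int × Int)) i =>
          ((st.2.zipIdx.foldl
            (fun (g : List (List Nat)) vj =>
              if pvInter (f i).1 (f i).2 vj.1.1 vj.1.2 then
                (g.modify i (· ++ [vj.2])).modify vj.2 (· ++ [i])
              else g) st.1), st.2 ++ [f i]))
        ((List.range m).map (fun _ => []), [])
      = ((List.range m).map (fun v => if v < k then gk f k v else []),
         (List.range k).map f) := by
  intro k
  induction k with
  | zero =>
    intro _
    simp only [List.range_zero, List.foldl_nil, List.map_nil]
    refine Prod.ext ?_ rfl
    apply List.map_congr_left
    intro v hv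
    simp
  | succ k ih =>
    intro hk1
    have hk : k < m := by omega
    rw [List.range_succ, List.foldl_append, ih (by omega)]
    simp only [List.foldl_cons, List.foldl_nil]
    refine Prod.ext ?_ ?_
    · show (((List.range k).map f).zipIdx.foldl _ _) = _
      rw [zipIdx_map_range, List.foldl_map]
      have hI := inner_aux f m k hk k le_rfl
      refine Eq.trans hI ?_
      apply List.map_congr_left
      intro v hv
      rw [List.mem_range] at hv
      by_cases hvk : v = k
      · subst hvk
        have h2 : (List.range (v+1)).filter (fun u => decide (v < u) && cr f u v) = [] := by
          apply List.filter_eq_nil_iff.mpr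
          intro u hu
          rw [List.mem_range] at hu
          have : ¬ (v < u) := by omega
          simp [this]
        simp [gk, h2, Nat.lt_succ_self]
      · by_cases hvlt : v < k
        · have hv1 : v < k + 1 := by omega
          simp only [hvk, if_neg, hvlt, if_pos, hv1, ite_true, ite_false]
          show gk f k v ++ _ = gk f (k+1) v
          simp only [gk, List.range_succ, List.filter_append, List.append_assoc]
          congr 1
          simp only [List.filter_cons, List.filter_nil]
          by_cases hcr : cr f k v = true
          · simp [hvlt, hcr]
          · simp [hvlt, hcr]
        · have h1 : ¬ (v < k + 1) := by omega
          simp [hvk, hvlt, h1]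
    · show ((List.range k).map f) ++ [f k] = _
      simp

lemma gk_eq_nbF (f : Nat → Int × Int) (hf : ∀ i, (f i).1 ≤ (f i).2) (m v : Nat) (hv : v < m) :
    gk f m v = nbF f m v := by
  have hr : List.range m
      = (List.range v ++ [v]) ++ (List.range (m - v - 1)).map (fun x => (v+1) + x) := by
    have hsplit : m = (v + 1) + (m - v - 1) := by omega
    rw [← List.range_succ, ← List.range_add, ← hsplit]
  unfold gk nbF
  rw [hr]
  simp only [List.filter_append]
  have e1 : (List.range v).filter (fun u => decide (v < u) && cr f u v) = [] := by
    apply List.filter_eq_nil_iff.mpr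
    intro u hu
    rw [List.mem_range] at hu
    have : ¬ (v < u) := by omega
    simp [this]
  have e2 : [v].filter (fun u => decide (v < u) && cr f u v) = [] := by simp
  have e3 : [v].filter (fun u => u != v && cr f v u) = [] := by simp
  have e4 : (List.range v).filter (fun u => u != v && cr f v u)
      = (List.range v).filter (fun u => cr f v u) := by
    apply List.filter_congr
    intro u hu
    rw [List.mem_range] at hu
    have : u ≠ v := by omega
    simp [this]
  have e5 : ((List.range (m - v - 1)).map (fun x => (v+1) + x)).filter
        (fun u => decide (v < u) && cr f u v)
      = ((List.range (m - v - 1)).map (fun x => (v+1) + x)).filter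
        (fun u => u != v && cr f v u) := by
    apply List.filter_congr
    intro u hu
    obtain ⟨x, hx, rfl⟩ := List.mem_map.mp hu
    have h1 : v < (v+1) + x := by omega
    have h2 : (v+1) + x ≠ v := by omega
    rw [cr_comm f hf ((v+1) + x) v]
    simp [h1, h2]
  rw [e1, e2, e3, e4, e5]
  simp

lemma nbrsB_eq_nbF (f : Nat → Int × Int) (m v : Nat) (hv : v < m) :
    nbrsB ((List.range m).map f) m v = nbF f m v := by
  unfold nbrsB nbF
  apply List.filter_congr
  intro u hu
  rw [List.mem_range] at hu
  have hgv : ((List.range m).map f).getD v (0,0) = f v := by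
    rw [List.getD_eq_getElem?_getD, List.getElem?_map, List.getElem?_range hv]
    rfl
  have hgu : ((List.range m).map f).getD u (0,0) = f u := by
    rw [List.getD_eq_getElem?_getD, List.getElem?_map, List.getElem?_range hu]
    rfl
  rw [hgv, hgu]
  rfl

-- ===== outer loop and assembly =====

def stepA (G : List (List Nat)) (m : Nat) (st : List Int × Bool) (i : Nat) : List Int × Bool :=
  if st.2 then st
  else if st.1.getD i (-1) == -1 then dfsA G (m+1) i 0 st.1
  else st

def stepB (iv : List (Int × Int)) (m : Nat) (st : List Int × Bool) (s : Nat) : List Int × Bool :=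
  if st.2 then st
  else if st.1.getD s (-1) != -1 then st
  else stackRun iv m (m * m + m + 2) [(s, 0)] st.1

def runA (G : List (List Nat)) (m : Nat) : String :=
  let fin := (List.range m).foldl (stepA G m) (List.replicate m (-1), false)
  if fin.2 then "Impossible"
  else PySem.Str.join "" (fin.1.map fun c => if c == 0 then "I" else "O")

def runB (iv : List (Int × Int)) (m : Nat) : String :=
  let fin := (List.range m).foldl (stepB iv m) (List.replicate m (-1), false)
  if fin.2 then "Impossible"
  else PySem.Str.join "" (fin.1.map fun c => if c == 0 then "I" else "O")

lemma outer (G : List (List Nat)) (iv : List (Int × Int)) (m : Nat) (f : Nat → Int × Int)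
    (hGl : G.length = m)
    (hG : ∀ v, v < m → G.getD v [] = nbF f m v)
    (hB : ∀ v, v < m → nbrsB iv m v = nbF f m v) :
    ∀ (L : List Nat), (∀ i ∈ L, i < m) → ∀ (sa sb : List Int × Bool),
      sa.2 = sb.2 → (sa.2 = false → sa = sb) → (sa.2 = false → sa.1.length = m) →
      (L.foldl (stepA G m) sa).2 = (L.foldl (stepB iv m) sb).2
      ∧ ((L.foldl (stepA G m) sa).2 = false →
          L.foldl (stepA G m) sa = L.foldl (stepB iv m) sb) := by
  intro L
  induction L with
  | nil =>
    intro _ sa sb h2 heq _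
    exact ⟨h2, fun h => heq h⟩
  | cons i L ihl =>
    intro hL sa sb h2 heq hlen
    have him : i < m := hL i List.mem_cons_self
    have hLr : ∀ x ∈ L, x < m := fun x hx => hL x (List.mem_cons_of_mem _ hx)
    simp only [List.foldl_cons]
    by_cases hsa2 : sa.2 = true
    · have hsb2 : sb.2 = true := h2 ▸ hsa2
      rw [show stepA G m sa i = sa from by simp [stepA, hsa2],
          show stepB iv m sb i = sb from by simp [stepB, hsb2]]
      exact ihl hLr sa sb h2 heq hlen
    · have hsa2' : sa.2 = false := by simpa using hsa2
      have hsab : sa = sb := heq hsa2'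
      subst hsab
      have hlen' : sa.1.length = m := hlen hsa2'
      have hU : uncol sa.1 ≤ m := by
        have := uncol_le_length sa.1; omega
      have hmm : uncol sa.1 * (m+1) ≤ m * (m+1) := Nat.mul_le_mul_right _ hU
      have hmm2 : m * (m+1) = m*m + m := by ring
      by_cases hcol : sa.1.getD i (-1) = -1
      · have hcol' := hcol
        rw [List.getD_eq_getElem?_getD] at hcol'
        have hA : stepA G m sa i = dfsA G (m+1) i 0 sa.1 := by
          simp [stepA, hsa2', hcol']
        have hBs : stepB iv m sa i = stackRun iv m (m*m+m+2) [(i,0)] sa.1 := by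
          simp [stepB, hsa2', hcol']
        have hstab : dfsA G (m+1) i 0 sa.1 = dfsA G (uncol sa.1 + 1) i 0 sa.1 := by
          apply dfsA_stab G m hGl (uncol sa.1) sa.1 le_rfl i 0 _ _ (Or.inl rfl) hlen'
            (by omega) (by omega)
        have hsimm := sim G iv m f hGl hG hB (uncol sa.1) sa.1 i 0 [] le_rfl hlen'
          (Or.inl rfl) him (by simp)
        by_cases hr2 : (dfsA G (uncol sa.1 + 1) i 0 sa.1).2 = true
        · have hstack : (stackRun iv m (m*m+m+2) [(i,0)] sa.1).2 = true := by
            apply hsimm.1 hr2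
            simp only [List.length_nil]
            omega
          rw [hA, hBs, hstab]
          apply ihl hLr
          · rw [hr2, hstack]
          · intro hcontr; rw [hcontr] at hr2; cases hr2
          · intro hcontr; rw [hcontr] at hr2; cases hr2
        · have hr2' : (dfsA G (uncol sa.1 + 1) i 0 sa.1).2 = false := by simpa using hr2
          have hext := dfsA_ext G (uncol sa.1 + 1) i 0 sa.1
          have heqrun : stackRun iv m (m*m+m+2) [(i,0)] sa.1
              = dfsA G (uncol sa.1 + 1) i 0 sa.1 := by
            have hrun := hsimm.2 hr2' (m*m+m+2)
              (uncol (dfsA G (uncol sa.1 + 1) i 0 sa.1).1 * (m+1) + 1)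
              (by simp only [List.length_nil]; omega)
              (by simp only [List.length_nil]; omega)
            rw [hrun]
            show ((dfsA G (uncol sa.1 + 1) i 0 sa.1).1, false) = _
            rw [← hr2']
          rw [hA, hBs, hstab, heqrun]
          exact ihl hLr _ _ rfl (fun _ => rfl) (fun _ => by rw [hext.1, hlen'])
      · have hcol' : ¬ (sa.1[i]?.getD (-1) = -1) := by
          rw [← List.getD_eq_getElem?_getD]; exact hcol
        rw [show stepA G m sa i = sa from by simp [stepA, hsa2', hcol'],
            show stepB iv m sa i = sa from by simp [stepB, hsa2', hcol']]
        exact ihl hLr sa sa rfl (fun _ => rfl) hlen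

lemma assemble (G : List (List Nat)) (iv : List (Int × Int)) (m : Nat) (f : Nat → Int × Int)
    (hGl : G.length = m)
    (hG : ∀ v, v < m → G.getD v [] = nbF f m v)
    (hB : ∀ v, v < m → nbrsB iv m v = nbF f m v) :
    runA G m = runB iv m := by
  have h := outer G iv m f hGl hG hB (List.range m) (fun i hi => List.mem_range.mp hi)
    (List.replicate m (-1), false) (List.replicate m (-1), false) rfl (fun _ => rfl)
    (fun _ => by simp)
  unfold runA runB
  by_cases h2 : ((List.range m).foldl (stepA G m) (List.replicate m (-1), false)).2 = true
  · rw [if_pos h2, if_pos (h.1 ▸ h2)]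
  · have h2' : ((List.range m).foldl (stepA G m) (List.replicate m (-1), false)).2 = false := by
      simpa using h2
    rw [h.2 h2']

-- ===== VERDICT (by name: the statement is the Claim_ definition above) =====
theorem solve_spec : Claim_equal_solve := by
  intro input _ _
  unfold Spec_solve
  have hf : ∀ i, (ivf input i).1 ≤ (ivf input i).2 := ivf_le input
  have hb := phase1 (ivf input) (((input.headD []).getD 1 0).toNat)
    (((input.headD []).getD 1 0).toNat) le_rfl
  have hA : solve input
      = runA ((List.range (((input.headD []).getD 1 0).toNat)).foldl
          (fun (st : List (List Nat) × List (Int × Int)) i =>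
            ((st.2.zipIdx.foldl
              (fun (g : List (List Nat)) vj =>
                if pvInter (ivf input i).1 (ivf input i).2 vj.1.1 vj.1.2 then
                  (g.modify i (· ++ [vj.2])).modify vj.2 (· ++ [i])
                else g) st.1), st.2 ++ [ivf input i]))
          ((List.range (((input.headD []).getD 1 0).toNat)).map (fun _ => []), [])).1
          (((input.headD []).getD 1 0).toNat) := rfl
  rw [hb] at hA
  have hBalt : solve_alt input
      = runB ((List.range (((input.headD []).getD 1 0).toNat)).map (ivf input))
          (((input.headD []).getD 1 0).toNat) := rfl
  rw [hA, hBalt]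
  apply assemble _ _ _ (ivf input)
  · simp
  · intro v hv
    rw [List.getD_eq_getElem?_getD, List.getElem?_map, List.getElem?_range hv]
    simp only [Option.map_some, Option.getD_some, if_pos hv]
    exact gk_eq_nbF (ivf input) hf _ v hv
  · intro v hv
    exact nbrsB_eq_nbF (ivf input) _ v hv
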